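-- pv_equiv track=rewrite | github.com/QuachTinh68/LessonCode | Python/Demo/testing/funciton.py | inChan
-- ===== SOURCE A (Python) =====
-- def inChan(n):
--     sum=0
--     m=0
--     while n > 0:
--         m=n%10
--         if m%2==0:
--             sum+=m
--         n=n//10
--     return sum
-- ===== SOURCE B (Python) =====
-- def inChan(n):
--     if n <= 0:
--         return 0
--     return sum(int(d) for d in str(n) if int(d) % 2 == 0)
-- ===== Notes on version B (the rewrite author's own statement) =====
-- stated objective: simpler
-- what changed: B replaces A's arithmetic digit-peeling while loop by a single comprehension over the decimal string representation str(n), summing the even digit characters; a guard handles non-positive n, where A's while loop never runs.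
import Mathlib
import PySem

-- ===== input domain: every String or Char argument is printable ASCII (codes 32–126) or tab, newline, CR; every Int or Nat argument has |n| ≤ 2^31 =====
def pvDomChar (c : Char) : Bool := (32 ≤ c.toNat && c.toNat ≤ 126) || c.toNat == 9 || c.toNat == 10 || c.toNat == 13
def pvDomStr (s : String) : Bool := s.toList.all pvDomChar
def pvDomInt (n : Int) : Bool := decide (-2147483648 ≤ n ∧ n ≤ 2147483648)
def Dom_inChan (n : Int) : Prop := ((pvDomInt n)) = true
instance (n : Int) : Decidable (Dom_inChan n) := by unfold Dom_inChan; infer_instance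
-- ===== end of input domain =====

-- B replaces A's %10 / //10 digit-peeling loop by summing the even digit characters of str(n) (objective: simpler).


-- ===== PORT A =====
-- the while loop of A, as structural recursion on the state (n, sum)
def inChanLoop (n sum : Int) : Int :=
  if 0 < n then
    let m := PySem.Int.mod n 10
    inChanLoop (PySem.Int.floordiv n 10) (if PySem.Int.mod m 2 = 0 then sum + m else sum)
  else sum
  termination_by n.toNat
  decreasing_by
    rw [PySem.Int.floordiv_eq_ediv_of_pos (by norm_num)]
    omega

def inChan (n : Int) : Int := inChanLoop n 0

-- ===== PORT B =====
-- int(d) for a single decimal-digit character (Source B only applies int() to characters of str(n) with n > 0, which are exactly the digits '0'..'9'; exact there)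
def pyDigitVal (c : Char) : Int := (c.toNat : Int) - 48

def inChan_alt (n : Int) : Int :=
  if n ≤ 0 then 0
  else (((PySem.Int.toStr n).toList.filter
          (fun c => PySem.Int.mod (pyDigitVal c) 2 == 0)).map pyDigitVal).sum

-- ===== PRECONDITION & SPEC =====
def Spec_inChan (n : Int) (out : Int) : Prop := out = inChan_alt n
instance (n : Int) (out : Int) : Decidable (Spec_inChan n out) := by unfold Spec_inChan; infer_instance

-- ===== CLAIM (what is proved, stated in full; the proofs are below) =====
def Claim_equal_inChan : Prop := ∀ (n : Int), Dom_inChan n → Spec_inChan n (inChan n)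

-- ===== LEMMAS AND PROOFS =====

-- even-digit sum of a natural number, the common characterisation of both ports
def evenSum (n : Nat) : Int :=
  if n = 0 then 0
  else (if n % 10 % 2 = 0 then ((n % 10 : Nat) : Int) else 0) + evenSum (n / 10)
  termination_by n
  decreasing_by omega

-- B's summed value of a character list
def S (l : List Char) : Int :=
  ((l.filter (fun c => PySem.Int.mod (pyDigitVal c) 2 == 0)).map pyDigitVal).sum

lemma S_cons_digit (d : Nat) (hd : d < 10) (ds : List Char) :
    S (Nat.digitChar d :: ds) = (if d % 2 = 0 then (d : Int) else 0) + S ds := by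
  interval_cases d <;>
    simp [S, pyDigitVal, Nat.digitChar, PySem.Int.mod]

lemma S_toDigitsCore (fuel : Nat) : ∀ (n : Nat) (ds : List Char), n < fuel →
    S (Nat.toDigitsCore 10 fuel n ds) = evenSum n + S ds := by
  induction fuel with
  | zero => intro n ds h; omega
  | succ f ih =>
    intro n ds h
    rw [Nat.toDigitsCore]
    by_cases h0 : n / 10 = 0
    · simp only [h0, if_true]
      rw [S_cons_digit (n % 10) (by omega) ds, evenSum]
      by_cases hn : n = 0
      · simp [hn]
      · rw [if_neg hn, h0, evenSum]
        simp
    · have hn : n ≠ 0 := by omega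
      rw [if_neg h0, ih (n / 10) _ (by omega),
        S_cons_digit (n % 10) (by omega) ds]
      conv_rhs => rw [evenSum]
      rw [if_neg hn]
      ring

lemma S_toDigits (m : Nat) : S (Nat.toDigits 10 m) = evenSum m :=
  by simpa [S] using S_toDigitsCore (m + 1) m [] (by omega)

lemma inChanLoop_eq (m : Nat) : ∀ (s : Int), inChanLoop (m : Int) s = s + evenSum m := by
  induction m using Nat.strong_induction_on with
  | _ m ih =>
    intro s
    rw [inChanLoop]
    by_cases h0 : m = 0
    · subst h0; rw [evenSum]; simp
    · have hm : (0 : Int) < (m : Int) := by exact_mod_cast Nat.pos_of_ne_zero h0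
      rw [if_pos hm]
      have h10 : PySem.Int.mod (m : Int) 10 = ((m % 10 : Nat) : Int) := by
        rw [PySem.Int.mod_eq_emod_of_pos (by norm_num)]
        exact_mod_cast (Int.natCast_mod m 10).symm
      have hdiv : PySem.Int.floordiv (m : Int) 10 = ((m / 10 : Nat) : Int) := by
        rw [PySem.Int.floordiv_eq_ediv_of_pos (by norm_num)]
        exact_mod_cast (Int.natCast_div m 10).symm
      have h2 : PySem.Int.mod ((m % 10 : Nat) : Int) 2 = ((m % 10 % 2 : Nat) : Int) := by
        rw [PySem.Int.mod_eq_emod_of_pos (by norm_num)]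
        exact_mod_cast (Int.natCast_mod (m % 10) 2).symm
      simp only [h10, hdiv, h2]
      rw [ih (m / 10) (by omega)]
      conv_rhs => rw [evenSum]
      rw [if_neg h0]
      by_cases he : m % 10 % 2 = 0
      · rw [if_pos (by exact_mod_cast congrArg (fun k : Nat => (k : Int)) he), if_pos he]
        ring
      · rw [if_neg (fun hc => he (by exact_mod_cast hc)), if_neg he]
        ring

-- ===== VERDICT (by name: the statement is the Claim_ definition above) =====
theorem inChan_spec : Claim_equal_inChan := by
  intro n _
  unfold Spec_inChan inChan inChan_alt
  by_cases h : n ≤ 0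
  · rw [if_pos h, inChanLoop, if_neg (by omega)]
  · rw [if_neg h]
    obtain ⟨m, rfl⟩ : ∃ m : Nat, n = (m : Int) := ⟨n.toNat, by omega⟩
    rw [inChanLoop_eq m 0, zero_add]
    rw [PySem.Int.toList_toStr]
    show evenSum m = S (PySem.Int.toChars (m : Int))
    rw [PySem.Int.toChars, if_neg (by omega)]
    rw [show ((m : Int)).toNat = m from Int.toNat_natCast m, S_toDigits]
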